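-- pv_equiv track=rewrite | github.com/Mshack735/head-tails | b12roundSum.py | round_sum
-- ===== SOURCE A (Python) =====
-- def round_sum(a, b, c):
--   # insert your logic here
--   numbers=[a,b,c]
--   roundednum=[]
--   roundedsum=0
--   for x in range(len(numbers)):
--     num=numbers[x]
--     if num%10 >=5:
--       num+=(10-num%10)
--
--     elif num%10 <5:
--       num-=(num%10)
--     roundednum.append(num)
--   for x in range(len(roundednum)):
--     roundedsum+=roundednum[x]
--   return roundedsum
-- ===== SOURCE B (Python) =====
-- # Table-driven: one precomputed correction per last decimal digit; no branches, no per-number rounding pass.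
-- _CORR = (0, -1, -2, -3, -4, 5, 4, 3, 2, 1)
--
-- def round_sum(a, b, c):
--     return a + b + c + _CORR[a % 10] + _CORR[b % 10] + _CORR[c % 10]
-- ===== Notes on version B (the rewrite author's own statement) =====
-- stated objective: alternative
-- what changed: Replaces A's branch-based rounding loop over a built list plus a second summing loop with a single expression: the raw sum a+b+c plus a precomputed correction table indexed by each number's last decimal digit.
import Mathlib
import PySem

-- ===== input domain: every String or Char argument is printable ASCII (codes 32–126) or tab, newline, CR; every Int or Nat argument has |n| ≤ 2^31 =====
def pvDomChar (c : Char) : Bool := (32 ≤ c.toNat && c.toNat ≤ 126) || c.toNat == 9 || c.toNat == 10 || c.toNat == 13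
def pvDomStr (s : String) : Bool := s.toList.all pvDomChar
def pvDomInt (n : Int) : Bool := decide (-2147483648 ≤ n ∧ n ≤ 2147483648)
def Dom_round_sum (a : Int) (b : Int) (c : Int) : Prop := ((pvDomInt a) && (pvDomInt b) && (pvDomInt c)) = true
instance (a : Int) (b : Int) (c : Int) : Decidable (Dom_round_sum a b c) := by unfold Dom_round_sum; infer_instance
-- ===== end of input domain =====

-- B replaces A's branch-based rounding loop plus second summing loop with the raw sum
-- a+b+c corrected by a precomputed table indexed by each number's last decimal digit
-- (objective: alternative).

-- ===== PORT A =====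
def round_sum (a : Int) (b : Int) (c : Int) : Int :=
  let numbers : List Int := [a, b, c]
  let roundednum : List Int :=
    (PySem.List.pyRange 0 (numbers.length : Int) 1).foldl (fun acc x =>
      let num := (PySem.List.pyGet? numbers x).getD 0   -- index always in range here
      let num :=
        if PySem.Int.mod num 10 ≥ 5 then num + (10 - PySem.Int.mod num 10)
        else if PySem.Int.mod num 10 < 5 then num - PySem.Int.mod num 10
        else num
      acc ++ [num]) []
  (PySem.List.pyRange 0 (roundednum.length : Int) 1).foldl (fun s x =>
    s + (PySem.List.pyGet? roundednum x).getD 0) 0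

-- ===== PORT B =====
def pvCorr : List Int := [0, -1, -2, -3, -4, 5, 4, 3, 2, 1]

def round_sum_alt (a : Int) (b : Int) (c : Int) : Int :=
  a + b + c
    + (PySem.List.pyGet? pvCorr (PySem.Int.mod a 10)).getD 0   -- index x%10 ∈ [0,10): always in range
    + (PySem.List.pyGet? pvCorr (PySem.Int.mod b 10)).getD 0
    + (PySem.List.pyGet? pvCorr (PySem.Int.mod c 10)).getD 0

-- ===== PRECONDITION & SPEC =====
def Spec_round_sum (a : Int) (b : Int) (c : Int) (out : Int) : Prop := out = round_sum_alt a b c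
instance (a : Int) (b : Int) (c : Int) (out : Int) : Decidable (Spec_round_sum a b c out) := by unfold Spec_round_sum; infer_instance

-- ===== CLAIM (what is proved, stated in full; the proofs are below) =====
def Claim_equal_round_sum : Prop := ∀ (a : Int) (b : Int) (c : Int), Dom_round_sum a b c → Spec_round_sum a b c (round_sum a b c)

-- ===== LEMMAS AND PROOFS =====

-- A's per-number rounding equals the raw number plus the table correction for its last digit.
theorem pvRound_eq_corr (x : Int) :
    (if 5 ≤ x % 10 then x + (10 - x % 10) else if x % 10 < 5 then x - x % 10 else x)
    = x + (PySem.List.pyGet? pvCorr (x % 10)).getD 0 := by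
  have h : x % 10 = 0 ∨ x % 10 = 1 ∨ x % 10 = 2 ∨ x % 10 = 3 ∨ x % 10 = 4 ∨ x % 10 = 5 ∨
      x % 10 = 6 ∨ x % 10 = 7 ∨ x % 10 = 8 ∨ x % 10 = 9 := by omega
  rcases h with h | h | h | h | h | h | h | h | h | h <;>
    (rw [h]; simp [pvCorr, PySem.List.pyGet?, PySem.List.pyIdx?]) <;> omega

-- ===== VERDICT (by name: the statement is the Claim_ definition above) =====
theorem round_sum_spec : Claim_equal_round_sum := by
  intro a b c _
  show round_sum a b c = round_sum_alt a b c
  unfold round_sum round_sum_alt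
  have h : PySem.List.pyRange 0 3 1 = [0, 1, 2] := by decide
  norm_num [h, PySem.List.pyGet?, PySem.List.pyIdx?]
  simp only [show Int.toNat 2 = 2 from rfl, List.getElem_cons_succ, List.getElem_cons_zero]
  rw [pvRound_eq_corr a, pvRound_eq_corr b, pvRound_eq_corr c]
  simp [PySem.List.pyGet?, PySem.List.pyIdx?]
  ring
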